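-- pv_equiv track=rewrite | github.com/suulcoder/Compiladores3 | lectorExpresionesMejorado.py | there_is_concat
-- ===== SOURCE A (Python) =====
-- def is_op(a):
--     if a == '+' or a == '*' or a == '?' or a == '|':
--         return True
--     return False
--
-- def there_is_concat(expresion):
--     concatenacion = False
--     for x in range(len(expresion) -1 ):
--         if not is_op(expresion[x]):
--             if not is_op(expresion[x + 1]):
--                 concatenacion = True
--                 break
--
--     return concatenacion
-- ===== SOURCE B (Python) =====
-- def is_op(a):
--     if a == '+' or a == '*' or a == '?' or a == '|':
--         return True
--     return False
--
-- def there_is_concat(expresion):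
--     # collect the positions of operator characters, with sentinels -1 and len;
--     # two adjacent non-operators exist iff some gap between consecutive
--     # operator positions is >= 3 (a segment of >= 2 non-operator chars)
--     ops = [-1]
--     for i, c in enumerate(expresion):
--         if is_op(c):
--             ops.append(i)
--     ops.append(len(expresion))
--     return any(b - a >= 3 for a, b in zip(ops, ops[1:]))
-- ===== Notes on version B (the rewrite author's own statement) =====
-- stated objective: alternative
-- what changed: B no longer scans adjacent character pairs: it first builds the list of operator positions (with sentinels -1 and len) and then decides by arithmetic on the gaps between consecutive positions (a gap >= 3 means a segment of >= 2 non-operator chars).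
import Mathlib
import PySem

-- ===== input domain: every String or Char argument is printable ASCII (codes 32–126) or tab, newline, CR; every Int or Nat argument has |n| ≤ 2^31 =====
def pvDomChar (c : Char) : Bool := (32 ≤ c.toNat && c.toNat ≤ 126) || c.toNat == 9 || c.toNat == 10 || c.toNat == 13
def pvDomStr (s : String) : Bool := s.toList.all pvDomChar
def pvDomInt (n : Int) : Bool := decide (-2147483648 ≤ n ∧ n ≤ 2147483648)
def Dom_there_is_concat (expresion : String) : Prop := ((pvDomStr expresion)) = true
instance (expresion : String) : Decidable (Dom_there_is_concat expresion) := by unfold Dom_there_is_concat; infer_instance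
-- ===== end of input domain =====

-- B builds the list of operator positions (with sentinels) and decides by gap
-- arithmetic instead of scanning adjacent character pairs (objective: alternative).

-- ===== PORT A =====
-- is_op
def isOp (a : Char) : Bool :=
  if a = '+' || a = '*' || a = '?' || a = '|' then true else false

-- the 'for x in range(len(expresion)-1)' loop with its break; indices are always in
-- range here, so pyGetD with a dummy default is exact for expresion[x] / expresion[x+1]
def aLoop (cs : List Char) : List Int → Bool
  | [] => false
  | x :: rest =>
    if !isOp (PySem.List.pyGetD cs x ' ') then
      if !isOp (PySem.List.pyGetD cs (x + 1) ' ') then true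
      else aLoop cs rest
    else aLoop cs rest

def there_is_concat (expresion : String) : Bool :=
  aLoop expresion.toList (PySem.List.pyRange 0 (PySem.Str.len expresion - 1) 1)

-- ===== PORT B =====
-- the 'for i, c in enumerate(expresion): if is_op(c): ops.append(i)' loop of Source B,
-- producing the operator positions starting from index i
def collectOps : List Char → Int → List Int
  | [], _ => []
  | c :: rest, i =>
    if isOp c then i :: collectOps rest (i + 1) else collectOps rest (i + 1)

-- 'any(b - a >= 3 for a, b in zip(ops, ops[1:]))' over adjacent pairs of the list
def gapScan : List Int → Bool
  | a :: b :: rest => decide (b - a ≥ 3) || gapScan (b :: rest)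
  | _ => false

def there_is_concat_alt (expresion : String) : Bool :=
  gapScan (-1 :: (collectOps expresion.toList 0 ++ [(expresion.toList.length : Int)]))

-- ===== PRECONDITION & SPEC =====
def Spec_there_is_concat (expresion : String) (out : Bool) : Prop := out = there_is_concat_alt expresion
instance (expresion : String) (out : Bool) : Decidable (Spec_there_is_concat expresion out) := by unfold Spec_there_is_concat; infer_instance

-- ===== CLAIM (what is proved, stated in full; the proofs are below) =====
def Claim_equal_there_is_concat : Prop := ∀ (expresion : String), Dom_there_is_concat expresion → Spec_there_is_concat expresion (there_is_concat expresion)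

-- ===== LEMMAS AND PROOFS =====

-- common characterisation: some adjacent pair of chars is both non-operator
def pairScan : List Char → Bool
  | a :: b :: rest => (!isOp a && !isOp b) || pairScan (b :: rest)
  | _ => false

theorem pairScan_short (l : List Char) (h : l.length ≤ 1) : pairScan l = false := by
  match l, h with
  | [], _ => rfl
  | [a], _ => rfl

theorem aLoop_eq (cs : List Char) :
    ∀ (k i : Nat), i + k = cs.length →
      aLoop cs (PySem.List.pyRange (i : Int) ((cs.length : Int) - 1) 1) = pairScan (cs.drop i) := by
  intro k
  induction k with
  | zero =>
    intro i hi
    have hr : PySem.List.pyRange (i : Int) ((cs.length : Int) - 1) 1 = [] := by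
      rw [PySem.List.pyRange_one]
      have : ((cs.length : Int) - 1 - i).toNat = 0 := by omega
      simp [this]
    rw [hr]
    have : (cs.drop i).length ≤ 1 := by simp; omega
    simp [aLoop, pairScan_short _ this]
  | succ m ih =>
    intro i hi
    by_cases hlast : i + 1 = cs.length
    · have hr : PySem.List.pyRange (i : Int) ((cs.length : Int) - 1) 1 = [] := by
        rw [PySem.List.pyRange_one]
        have : ((cs.length : Int) - 1 - i).toNat = 0 := by omega
        simp [this]
      rw [hr]
      have : (cs.drop i).length ≤ 1 := by simp; omega
      simp [aLoop, pairScan_short _ this]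
    · have h1 : i + 1 < cs.length := by omega
      have hlt : (i : Int) < (cs.length : Int) - 1 := by omega
      rw [PySem.List.pyRange_one_cons hlt]
      have hg1 : PySem.List.pyGetD cs (i : Int) ' ' = cs[i] := by
        rw [PySem.List.pyGetD_natCast]
        exact List.getD_eq_getElem cs ' ' (by omega)
      have hg2 : PySem.List.pyGetD cs ((i : Int) + 1) ' ' = cs[i + 1] := by
        have : (i : Int) + 1 = ((i + 1 : Nat) : Int) := by push_cast; ring
        rw [this, PySem.List.pyGetD_natCast]
        exact List.getD_eq_getElem cs ' ' h1
      have hd1 : cs.drop i = cs[i] :: cs.drop (i + 1) :=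
        List.drop_eq_getElem_cons (by omega)
      have hd2 : cs.drop (i + 1) = cs[i + 1] :: cs.drop (i + 2) :=
        List.drop_eq_getElem_cons h1
      have hih := ih (i + 1) (by omega)
      have hcast : ((i + 1 : Nat) : Int) = (i : Int) + 1 := by push_cast; ring
      rw [hcast] at hih
      rw [hd1, hd2]
      rw [hd2] at hih
      simp only [aLoop, hg1, hg2, pairScan, hih]
      cases ha : isOp cs[i] <;> cases hb : isOp cs[i + 1] <;> simp

-- run-length reading of the gap structure: r = non-operator chars just before cs
def runF : List Char → Nat → Bool
  | [], r => decide (r ≥ 2)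
  | c :: rest, r => if isOp c then decide (r ≥ 2) || runF rest 0 else runF rest (r + 1)

theorem gapScan_eq (cs : List Char) :
    ∀ (p i : Int), p < i →
      gapScan (p :: (collectOps cs i ++ [i + (cs.length : Int)])) = runF cs (i - p - 1).toNat := by
  induction cs with
  | nil =>
    intro p i hp
    simp only [collectOps, List.nil_append, List.length_nil, Int.natCast_zero, add_zero,
      gapScan, runF, Bool.or_false]
    simp only [ge_iff_le, decide_eq_decide]
    omega
  | cons c rest ih =>
    intro p i hp
    by_cases hc : isOp c = true
    · have hsent : i + ((c :: rest).length : Int) = (i + 1) + (rest.length : Int) := by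
        simp; ring
      simp only [collectOps, hc, if_true, hsent, List.cons_append, gapScan,
        ih i (i + 1) (by omega), runF]
      have h1 : ((i + 1) - i - 1).toNat = 0 := by omega
      have h2 : (decide (i - p ≥ 3)) = decide ((i - p - 1).toNat ≥ 2) := by
        simp only [decide_eq_decide]; omega
      rw [h1, h2]
    · have hc' : isOp c = false := by simpa using hc
      have hsent : i + ((c :: rest).length : Int) = (i + 1) + (rest.length : Int) := by
        simp; ring
      simp only [collectOps, hc', Bool.false_eq_true, if_false, hsent, runF]
      have hn : ((i + 1) - p - 1).toNat = (i - p - 1).toNat + 1 := by omega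
      rw [← hn, ih p (i + 1) (by omega)]

-- first char (if any) is a non-operator
def headNonOp : List Char → Bool
  | [] => false
  | c :: _ => !isOp c

theorem runF_char (cs : List Char) :
    ∀ r : Nat, runF cs r = (decide (r ≥ 2) || (decide (r = 1) && headNonOp cs) || pairScan cs) := by
  induction cs with
  | nil =>
    intro r; simp [runF, headNonOp, pairScan]
  | cons c rest ih =>
    intro r
    by_cases hc : isOp c = true
    · have hps : pairScan (c :: rest) = pairScan rest := by
        cases rest with
        | nil => rfl
        | cons b r' => simp [pairScan, hc]
      simp only [runF, hc, if_true, ih 0, headNonOp, hc, hps]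
      simp
    · have hc' : isOp c = false := by simpa using hc
      simp only [runF, hc', Bool.false_eq_true, if_false, ih (r + 1), headNonOp, hc']
      cases rest with
      | nil =>
        simp only [headNonOp, pairScan, Bool.and_false, Bool.or_false, Bool.not_false,
          Bool.and_true]
        by_cases hr : r = 0
        · subst hr; decide
        · have e1 : decide (r + 1 ≥ 2) = true := by simp; omega
          have e2 : decide (r + 1 = 1) = false := by simp; omega
          have e3 : (decide (r ≥ 2) || decide (r = 1)) = true := by
            simp only [Bool.or_eq_true, decide_eq_true_eq]; omega
          simp [e1, e2, e3]
          omega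
      | cons b r' =>
        have hps : pairScan (c :: b :: r') = (!isOp b || pairScan (b :: r')) := by
          simp [pairScan, hc']
        simp only [headNonOp, hps, Bool.not_false, Bool.and_true]
        by_cases hr : r = 0
        · subst hr; simp
        · have e1 : decide (r + 1 ≥ 2) = true := by simp; omega
          have e3 : (decide (r ≥ 2) || decide (r = 1)) = true := by
            simp only [Bool.or_eq_true, decide_eq_true_eq]; omega
          simp only [e1, Bool.true_or]
          rw [show (decide (r ≥ 2) || decide (r = 1) || (!isOp b || pairScan (b :: r'))) =
              ((decide (r ≥ 2) || decide (r = 1)) || (!isOp b || pairScan (b :: r'))) by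
            cases decide (r ≥ 2) <;> cases decide (r = 1) <;> simp, e3]
          simp

-- ===== VERDICT (by name: the statement is the Claim_ definition above) =====
theorem there_is_concat_spec : Claim_equal_there_is_concat := by
  intro e _
  show there_is_concat e = there_is_concat_alt e
  unfold there_is_concat there_is_concat_alt
  rw [PySem.Str.len_eq]
  have hA := aLoop_eq e.toList e.toList.length 0 (by omega)
  simp only [Int.natCast_zero] at hA
  rw [hA, List.drop_zero]
  have hB := gapScan_eq e.toList (-1) 0 (by omega)
  simp only [zero_add] at hB
  rw [hB]
  have : ((0 : Int) - (-1) - 1).toNat = 0 := by omega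
  rw [this, runF_char e.toList 0]
  simp [pairScan]
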